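-- pv_equiv track=rewrite | github.com/Vasiliy-Basov/CodeWars | First/01_Word_Reversed.py | spin_words
-- ===== SOURCE A (Python) =====
-- def spin_words(sentence):
--     words = sentence.split(" ")   # Разделяем наше предложение слова, разделитель пробел
--     newsentence = []              # Создаем пустой список
--     for word in words:
--         if len(word) >= 5:
--             rword = word[::-1]    # Меняем местами буквы -1 значит что шаг -1
--         else:
--             rword = word
--         newsentence.append(rword) # Добавляем в наш список измененное или неизменное слово
--     return " ".join(newsentence)  # Делаем из списка строку с разделителем пробел
-- ===== SOURCE B (Python) =====
-- def spin_words(sentence):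
--     out = []
--     i = 0
--     n = len(sentence)
--     while i < n:
--         if sentence[i] == ' ':
--             out.append(' ')
--             i += 1
--         else:
--             j = i + 1
--             while j < n and sentence[j] != ' ':
--                 j += 1
--             run = sentence[i:j]
--             out.append(run[::-1] if j - i >= 5 else run)
--             i = j
--     return ''.join(out)
-- ===== Notes on version B (the rewrite author's own statement) =====
-- stated objective: alternative
-- what changed: Instead of splitting on spaces into a word list, mapping over it and rejoining, B does one left-to-right scan of the raw string, reversing each maximal run of non-space characters of length >= 5 in place (spaces are copied through, so no join is needed).
import Mathlib
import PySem

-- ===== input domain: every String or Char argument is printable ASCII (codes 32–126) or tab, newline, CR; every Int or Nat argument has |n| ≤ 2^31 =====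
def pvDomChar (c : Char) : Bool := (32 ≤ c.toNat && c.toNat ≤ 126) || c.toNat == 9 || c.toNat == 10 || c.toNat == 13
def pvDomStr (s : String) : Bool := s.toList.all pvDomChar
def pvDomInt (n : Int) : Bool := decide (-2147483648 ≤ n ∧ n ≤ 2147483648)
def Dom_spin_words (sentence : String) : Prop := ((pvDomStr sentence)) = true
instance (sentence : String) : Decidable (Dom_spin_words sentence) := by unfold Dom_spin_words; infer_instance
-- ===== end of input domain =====

-- B replaces A's split/map/join over a word list by a single in-place scan of the raw
-- character sequence, reversing each maximal non-space run of length >= 5 (alternative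
-- decomposition, same asymptotic cost).


-- ===== PORT A =====
-- words = sentence.split(" "); loop appending word[::-1] if len(word) >= 5 else word; " ".join(newsentence)
def spin_words (sentence : String) : String :=
  let words := PySem.Chars.splitOn sentence.toList [' ']
  let newsentence := words.foldl (fun acc word =>
    acc ++ [if 5 ≤ word.length then (PySem.List.slice? word none none (-1)).getD word else word]) []
  String.ofList (PySem.Chars.join [' '] newsentence)

-- ===== PORT B =====
-- Source B's single scan: a space is copied through; otherwise the maximal non-space run
-- (Source B's inner while loop = takeWhile/dropWhile) is emitted, reversed iff its length is >= 5.
def spinScan : List Char → List Char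
  | [] => []
  | c :: rest =>
    if c = ' ' then ' ' :: spinScan rest
    else
      let run := c :: rest.takeWhile (· ≠ ' ')
      (if 5 ≤ run.length then run.reverse else run) ++ spinScan (rest.dropWhile (· ≠ ' '))
termination_by l => l.length
decreasing_by
  · simp
  · simpa using Nat.lt_succ_of_le (rest.length_dropWhile_le _)

def spin_words_alt (sentence : String) : String :=
  String.ofList (spinScan sentence.toList)

-- ===== PRECONDITION & SPEC =====
def Spec_spin_words (sentence : String) (out : String) : Prop := out = spin_words_alt sentence
instance (sentence : String) (out : String) : Decidable (Spec_spin_words sentence out) := by unfold Spec_spin_words; infer_instance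

-- ===== CLAIM (what is proved, stated in full; the proofs are below) =====
def Claim_equal_spin_words : Prop := ∀ (sentence : String), Dom_spin_words sentence → Spec_spin_words sentence (spin_words sentence)

-- ===== LEMMAS AND PROOFS =====

-- clean reference recursion for A's split on a single space (cur = reversed current word)
def spl (cur : List Char) : List Char → List (List Char)
  | [] => [cur.reverse]
  | c :: rest => if c = ' ' then cur.reverse :: spl [] rest else spl (c :: cur) rest

-- the word transformation both programs apply
def spinWord (w : List Char) : List Char := if 5 ≤ w.length then w.reverse else w

lemma splitOn_go_space (fuel : Nat) : ∀ (l cur : List Char) (accs : List (List Char)),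
    l.length < fuel →
    PySem.Chars.splitOn.go [' '] fuel l cur accs = accs.reverse ++ spl cur l := by
  induction fuel with
  | zero => intro l cur accs h; omega
  | succ fuel ih =>
    intro l cur accs h
    cases l with
    | nil => simp [PySem.Chars.splitOn.go, spl]
    | cons c rest =>
      by_cases hc : c = ' '
      · subst hc
        rw [PySem.Chars.splitOn.go]
        simp only [List.isPrefixOf, BEq.rfl, Bool.true_and]
        rw [ih _ _ _ (by simpa using Nat.lt_of_succ_lt_succ h)]
        simp [spl]
      · rw [PySem.Chars.splitOn.go]
        have hp : [' '].isPrefixOf (c :: rest) = false := by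
          simp [List.isPrefixOf]
          exact fun h' => hc h'.symm
        rw [hp]
        simp only [Bool.false_eq_true, if_false]
        rw [ih _ _ _ (by simpa using Nat.lt_of_succ_lt_succ h)]
        simp [spl, hc]

lemma splitOn_space (l : List Char) : PySem.Chars.splitOn l [' '] = spl [] l := by
  rw [PySem.Chars.splitOn, splitOn_go_space _ _ _ _ (by omega)]
  simp

lemma dropWhile_space_head : ∀ (rest : List Char) (d : Char) (r : List Char),
    rest.dropWhile (· ≠ ' ') = d :: r → d = ' ' := by
  intro rest
  induction rest with
  | nil => intro d r h; simp at h
  | cons c t ih =>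
    intro d r h
    by_cases hc : c = ' '
    · subst hc; simp at h; exact h.1.symm
    · rw [List.dropWhile_cons] at h; simp [hc] at h; exact ih _ _ (by simpa using h)

lemma spl_eq (l : List Char) : ∀ cur, spl cur l =
    (cur.reverse ++ l.takeWhile (· ≠ ' ')) ::
      (if (l.dropWhile (· ≠ ' ')).isEmpty then []
       else spl [] (l.dropWhile (· ≠ ' ')).tail) := by
  induction l with
  | nil => intro cur; simp [spl]
  | cons c rest ih =>
    intro cur
    by_cases hc : c = ' '
    · subst hc; simp [spl]
    · rw [spl, if_neg hc, ih (c :: cur)]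
      simp [hc]

lemma join_map_spl (n : Nat) : ∀ l : List Char, l.length ≤ n →
    PySem.Chars.join [' '] ((spl [] l).map spinWord) = spinScan l := by
  induction n with
  | zero =>
    intro l h
    obtain rfl := List.length_eq_zero_iff.mp (Nat.le_zero.mp h)
    simp [spl, spinScan, spinWord, PySem.Chars.join_singleton]
  | succ n ih =>
    intro l h
    cases l with
    | nil => simp [spl, spinScan, spinWord, PySem.Chars.join_singleton]
    | cons c rest =>
      by_cases hc : c = ' '
      · subst hc
        rw [spl, if_pos rfl, spinScan, if_pos rfl]
        obtain ⟨w, ws, hw⟩ : ∃ w ws, spl ([] : List Char) rest = w :: ws :=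
          ⟨_, _, spl_eq rest []⟩
        rw [hw, List.map_cons, List.map_cons, PySem.Chars.join_cons_cons,
            ← List.map_cons, ← hw, ih rest (by simpa using Nat.le_of_succ_le_succ h)]
        simp [spinWord]
      · rw [spl_eq (c :: rest) [], spinScan, if_neg hc]
        simp only [List.reverse_nil, List.nil_append, List.takeWhile_cons,
          List.dropWhile_cons]
        have hcb : (decide (c ≠ ' ')) = true := by simp [hc]
        rw [hcb]
        simp only [if_true]
        cases hd : rest.dropWhile (· ≠ ' ') with
        | nil =>
          simp only [List.isEmpty_nil, if_true, List.map_cons, List.map_nil,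
            PySem.Chars.join_singleton]
          rw [spinScan.eq_def]
          simp [spinWord]
        | cons d r =>
          obtain rfl : d = ' ' := dropWhile_space_head rest d r hd
          simp only [List.isEmpty_cons, Bool.false_eq_true, if_false, List.tail_cons]
          obtain ⟨w, ws, hw⟩ : ∃ w ws, spl ([] : List Char) r = w :: ws :=
            ⟨_, _, spl_eq r []⟩
          rw [List.map_cons, hw, List.map_cons, PySem.Chars.join_cons_cons,
              ← List.map_cons, ← hw]
          have hr : r.length ≤ n := by
            have := rest.length_dropWhile_le (· ≠ ' ')
            rw [hd] at this; simp at this h; omega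
          rw [ih r hr, spinScan, if_pos rfl]
          simp [spinWord]

-- ===== VERDICT (by name: the statement is the Claim_ definition above) =====
theorem spin_words_spec : Claim_equal_spin_words := by
  intro sentence _
  show spin_words sentence = spin_words_alt sentence
  show String.ofList (PySem.Chars.join [' '] (List.foldl (fun acc word => acc ++ [if 5 ≤ word.length then (PySem.List.slice? word none none (-1)).getD word else word]) [] (PySem.Chars.splitOn sentence.toList [' ']))) = String.ofList (spinScan sentence.toList)
  rw [PySem.List.foldl_append_singleton_eq_map, splitOn_space]
  have hf : (fun word : List Char =>
      if 5 ≤ word.length then (PySem.List.slice? word none none (-1)).getD word else word)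
      = spinWord := by
    funext w
    simp [spinWord, PySem.List.slice?_none_none_neg_one]
  rw [hf, List.nil_append, join_map_spl sentence.toList.length _ le_rfl]
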